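-- pv_equiv track=rewrite | github.com/yeyanle6/yatesdemo1 | rppgdemo-main/compare_python_ios_runtime.py | _strip_preview_blocks
-- ===== SOURCE A (Python) =====
-- from typing import Dict, List, Optional, Tuple
--
-- def _strip_preview_blocks(swift_source: str) -> str:
--     """Remove trailing #Preview macro blocks for CLI swiftc compatibility."""
--     lines = swift_source.splitlines()
--     out: List[str] = []
--     skipping = False
--     depth = 0
--     for line in lines:
--         stripped = line.strip()
--         if not skipping and stripped.startswith("#Preview"):
--             skipping = True
--             depth = line.count("{") - line.count("}")
--             if depth <= 0:
--                 skipping = False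
--                 depth = 0
--             continue
--         if skipping:
--             depth += line.count("{") - line.count("}")
--             if depth <= 0:
--                 skipping = False
--                 depth = 0
--             continue
--         out.append(line)
--
--     merged = "\n".join(out)
--     if swift_source.endswith("\n"):
--         merged += "\n"
--     return merged
-- ===== SOURCE B (Python) =====
-- def _prefix_sums(nums):
--     total = 0
--     out = []
--     for d in nums:
--         total += d
--         out.append(total)
--     return out
--
--
-- def _strip_preview_blocks(swift_source: str) -> str:
--     """Remove trailing #Preview macro blocks for CLI swiftc compatibility."""
--     rest = swift_source.splitlines()
--     kept = []
--     while True: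
--         m = next((i for i, l in enumerate(rest) if l.strip().startswith("#Preview")), None)
--         if m is None:
--             kept.extend(rest)
--             break
--         kept.extend(rest[:m])
--         sums = _prefix_sums(l.count("{") - l.count("}") for l in rest[m:])
--         end = next((j for j, s in enumerate(sums) if s <= 0), len(sums) - 1)
--         rest = rest[m + end + 1:]
--     merged = "\n".join(kept)
--     if swift_source.endswith("\n"):
--         merged += "\n"
--     return merged
-- ===== Notes on version B (the rewrite author's own statement) =====
-- stated objective: alternative
-- what changed: Replaces A's per-line state machine (skipping flag + running depth folded over every line) by a staged segment algorithm: repeatedly search for the next #Preview marker line, compute the block's extent in one shot as the first index where the prefix sums of brace deltas drop to 0, and slice the line list past the block.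
import Mathlib
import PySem

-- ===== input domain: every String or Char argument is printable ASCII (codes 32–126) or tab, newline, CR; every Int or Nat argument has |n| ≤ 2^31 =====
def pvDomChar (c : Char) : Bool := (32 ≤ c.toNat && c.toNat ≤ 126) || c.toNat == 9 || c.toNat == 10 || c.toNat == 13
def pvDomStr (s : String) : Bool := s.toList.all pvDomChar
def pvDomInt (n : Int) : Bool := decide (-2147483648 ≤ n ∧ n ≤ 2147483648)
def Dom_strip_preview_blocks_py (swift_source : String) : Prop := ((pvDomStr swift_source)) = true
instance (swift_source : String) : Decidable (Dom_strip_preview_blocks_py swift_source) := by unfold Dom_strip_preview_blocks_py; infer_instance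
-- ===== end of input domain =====

-- B replaces A's per-line skipping/depth state machine by a staged segment algorithm
-- (search for the marker, find the block end via prefix sums, slice past it); alternative
-- decomposition, same asymptotic cost.

-- ===== PORT A =====
-- one iteration of A's for-loop: state = (out, skipping, depth)
def pvStepA (st : List String × Bool × Int) (line : String) : List String × Bool × Int :=
  let out := st.1
  let skipping := st.2.1
  let depth := st.2.2
  if !skipping && PySem.Str.startswith (PySem.Str.strip line) "#Preview" then
    let d : Int := (PySem.Str.count line "{" : Int) - (PySem.Str.count line "}" : Int)
    if d ≤ 0 then (out, false, 0) else (out, true, d)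
  else if skipping then
    let d : Int := depth + (PySem.Str.count line "{" : Int) - (PySem.Str.count line "}" : Int)
    if d ≤ 0 then (out, false, 0) else (out, true, d)
  else (out ++ [line], skipping, depth)

def strip_preview_blocks_py (swift_source : String) : String :=
  let lines := PySem.Str.splitlines swift_source
  let fin := lines.foldl pvStepA ([], false, 0)
  let merged := PySem.Str.join "\n" fin.1
  if PySem.Str.endswith swift_source "\n" then merged ++ "\n" else merged

-- ===== PORT B =====
-- `l.count("{") - l.count("}")`, the brace delta of one line
def pvDelta (l : String) : Int :=
  (PySem.Str.count l "{" : Int) - (PySem.Str.count l "}" : Int)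

-- `l.strip().startswith("#Preview")`
def pvIsMarker (l : String) : Bool :=
  PySem.Str.startswith (PySem.Str.strip l) "#Preview"

-- Source B's `_prefix_sums` (running totals of a list of deltas)
def pvPrefixSums (total : Int) : List Int → List Int
  | [] => []
  | d :: t => (total + d) :: pvPrefixSums (total + d) t

-- Source B's `sums = _prefix_sums(...)` and `end = next(..., len(sums) - 1)` for one segment
def pvEnd (block : List String) : Nat :=
  let sums := pvPrefixSums 0 (block.map pvDelta)
  ((sums.findIdx? (fun s => decide (s ≤ 0))).getD (sums.length - 1))

-- Source B's outer while-loop over `rest` (kept lines are returned, blocks are sliced away)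
def pvLoopB (rest : List String) : List String :=
  match _h : rest.findIdx? pvIsMarker with
  | none => rest
  | some m => rest.take m ++ pvLoopB (rest.drop (m + pvEnd (rest.drop m) + 1))
termination_by rest.length
decreasing_by
  have hm : m < rest.length := (List.findIdx?_eq_some_iff_findIdx_eq.mp _h).1
  simp only [List.length_drop]
  omega

def strip_preview_blocks_py_alt (swift_source : String) : String :=
  let kept := pvLoopB (PySem.Str.splitlines swift_source)
  let merged := PySem.Str.join "\n" kept
  if PySem.Str.endswith swift_source "\n" then merged ++ "\n" else merged

-- ===== PRECONDITION & SPEC =====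
def Spec_strip_preview_blocks_py (swift_source : String) (out : String) : Prop := out = strip_preview_blocks_py_alt swift_source
instance (swift_source : String) (out : String) : Decidable (Spec_strip_preview_blocks_py swift_source out) := by unfold Spec_strip_preview_blocks_py; infer_instance

-- ===== CLAIM (what is proved, stated in full; the proofs are below) =====
def Claim_equal_strip_preview_blocks_py : Prop := ∀ (swift_source : String), Dom_strip_preview_blocks_py swift_source → Spec_strip_preview_blocks_py swift_source (strip_preview_blocks_py swift_source)

-- ===== LEMMAS AND PROOFS =====

-- A's step on a marker line (first branch of the for-body)
theorem pvStepA_marker (out : List String) (d : Int) (l : String) (h : pvIsMarker l = true) :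
    pvStepA (out, false, d) l =
      if pvDelta l ≤ 0 then (out, false, 0) else (out, true, pvDelta l) := by
  unfold pvIsMarker at h
  simp only [pvStepA, pvDelta, Bool.not_false, Bool.true_and, h, if_true]

-- A's step in skipping mode (second branch)
theorem pvStepA_skip (out : List String) (d : Int) (l : String) :
    pvStepA (out, true, d) l =
      if d + pvDelta l ≤ 0 then (out, false, 0) else (out, true, d + pvDelta l) := by
  simp only [pvStepA, pvDelta, Bool.not_true, Bool.false_and, Bool.false_eq_true, if_false,
    if_true, add_sub_assoc]

-- A's step on an ordinary line (third branch)
theorem pvStepA_keep (out : List String) (d : Int) (l : String) (h : pvIsMarker l = false) :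
    pvStepA (out, false, d) l = (out ++ [l], false, d) := by
  unfold pvIsMarker at h
  simp only [pvStepA, Bool.not_false, Bool.true_and, h]
  simp

-- A's skipping loop, reified: consume lines while the running depth stays positive
def pvSkipA (depth : Int) (rest : List String) : List String :=
  if 0 < depth then
    match rest with
    | [] => []
    | l :: t => pvSkipA (depth + pvDelta l) t
  else rest

-- A's fold in skipping mode keeps the same lines as A restarted on what the skip leaves
theorem pvFold_skip (lines : List String) (out : List String) (d : Int) (hd : 0 < d) :
    (lines.foldl pvStepA (out, true, d)).1 = ((pvSkipA d lines).foldl pvStepA (out, false, 0)).1 := by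
  induction lines generalizing d with
  | nil => unfold pvSkipA; simp [hd]
  | cons l t ih =>
    rw [pvSkipA, if_pos hd, List.foldl_cons, pvStepA_skip]
    by_cases h : d + pvDelta l ≤ 0
    · rw [if_pos h, show pvSkipA (d + pvDelta l) t = t by unfold pvSkipA; rw [if_neg (by omega)]]
    · rw [if_neg h]
      exact ih _ (by omega)

-- the skip leaves exactly the suffix past the first index where the prefix sums drop to 0
theorem pvSkipA_eq_drop (t : List String) (d : Int) (hd : 0 < d) :
    pvSkipA d t = match (pvPrefixSums d (t.map pvDelta)).findIdx? (fun s => decide (s ≤ 0)) with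
      | some j => t.drop (j + 1)
      | none => [] := by
  induction t generalizing d with
  | nil => unfold pvSkipA; simp [hd, pvPrefixSums]
  | cons l t ih =>
    rw [pvSkipA, if_pos hd]
    simp only [List.map_cons, pvPrefixSums, List.findIdx?_cons]
    by_cases h : d + pvDelta l ≤ 0
    · rw [show pvSkipA (d + pvDelta l) t = t by unfold pvSkipA; rw [if_neg (by omega)]]
      simp [h]
    · rw [ih _ (by omega)]
      simp only [h, decide_false]
      rw [if_neg (by simp)]
      cases (pvPrefixSums (d + pvDelta l) (t.map pvDelta)).findIdx? (fun s => decide (s ≤ 0)) <;>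
        simp

-- lines without a marker are all appended by A's fold in non-skipping mode
theorem pvFold_nomarker (lines : List String) (hall : ∀ l ∈ lines, pvIsMarker l = false) :
    ∀ (out : List String) (d : Int),
      lines.foldl pvStepA (out, false, d) = (out ++ lines, false, d) := by
  induction lines with
  | nil => intro out d; simp
  | cons l t ih =>
    intro out d
    rw [List.foldl_cons, pvStepA_keep _ _ _ (hall l (by simp)),
      ih (fun x hx => hall x (by simp [hx])) (out ++ [l]) d]
    simp

-- length of prefix sums
theorem pvPrefixSums_length (acc : Int) (xs : List Int) :
    (pvPrefixSums acc xs).length = xs.length := by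
  induction xs generalizing acc with
  | nil => rfl
  | cons x t ih => simp [pvPrefixSums, ih]

-- pvEnd on a block whose marker line closes itself
theorem pvEnd_closed (l : String) (t : List String) (h : pvDelta l ≤ 0) :
    pvEnd (l :: t) = 0 := by
  simp [pvEnd, pvPrefixSums, List.findIdx?_cons, h]

-- pvEnd on a block whose marker line opens a positive depth
theorem pvEnd_open (l : String) (t : List String) (h : ¬ pvDelta l ≤ 0) :
    pvEnd (l :: t) =
      match (pvPrefixSums (pvDelta l) (t.map pvDelta)).findIdx? (fun s => decide (s ≤ 0)) with
      | some j => j + 1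
      | none => t.length := by
  simp only [pvEnd, List.map_cons, pvPrefixSums, Int.zero_add, List.findIdx?_cons]
  rw [if_neg (by simpa using h)]
  cases hj : (pvPrefixSums (pvDelta l) (t.map pvDelta)).findIdx? (fun s => decide (s ≤ 0)) with
  | some j => simp
  | none => simp [pvPrefixSums_length]

set_option maxHeartbeats 2000000 in
-- main invariant: A's fold from a non-skipping state accumulates exactly B's kept lines
theorem pvFold_main : ∀ (n : Nat) (lines : List String), lines.length ≤ n →
    ∀ (out : List String) (d : Int),
      (lines.foldl pvStepA (out, false, d)).1 = out ++ pvLoopB lines := by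
  intro n
  induction n with
  | zero =>
    intro lines hlen out d
    have : lines = [] := List.eq_nil_of_length_eq_zero (Nat.le_zero.mp hlen)
    subst this
    rw [pvLoopB]
    simp
  | succ n ih =>
    intro lines hlen out d
    rw [pvLoopB]
    split
    · next hnone =>
      have hall : ∀ l ∈ lines, pvIsMarker l = false := by
        intro l hl
        simpa using List.findIdx?_eq_none_iff.mp hnone l hl
      rw [pvFold_nomarker lines hall out d]
    · next m hsome =>
      obtain ⟨hm', hfind⟩ := List.findIdx?_eq_some_iff_findIdx_eq.mp hsome
      have hm : m < lines.length := hm'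
      have hmark : pvIsMarker lines[m] = true := by
        have := List.findIdx_getElem (p := pvIsMarker) (xs := lines) (w := by omega)
        simpa [hfind] using this
      have htake_all : ∀ l ∈ lines.take m, pvIsMarker l = false := by
        intro l hl
        obtain ⟨i, hi, hget⟩ := List.getElem_of_mem hl
        have hi' : i < m := by
          have := hi
          simp only [List.length_take] at this
          omega
        rw [← hget, List.getElem_take]
        have := List.not_of_lt_findIdx (p := pvIsMarker) (xs := lines) (hfind ▸ hi')
        simpa using this
      set t := lines.drop (m + 1) with ht
      have hlt : t.length ≤ n := by
        simp only [ht, List.length_drop]; omega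
      have hdec : lines = lines.take m ++ lines[m] :: t := by
        conv_lhs => rw [← List.take_append_drop m lines]
        rw [ht, List.drop_eq_getElem_cons hm]
      have hdropm : lines.drop m = lines[m] :: t := by
        rw [ht]; exact List.drop_eq_getElem_cons hm
      conv_lhs => rw [hdec]
      rw [List.foldl_append, pvFold_nomarker _ htake_all out d, List.foldl_cons,
        pvStepA_marker _ _ _ hmark, hdropm]
      by_cases hcle : pvDelta lines[m] ≤ 0
      · -- depth already ≤ 0: only the marker line is skipped
        rw [if_pos hcle, pvEnd_closed _ _ hcle]
        have hdrop1 : lines.drop (m + 0 + 1) = t := by rw [ht]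
        rw [hdrop1, ih t hlt (out ++ lines.take m) 0, List.append_assoc]
      · -- positive depth: the skip consumes up to the first prefix sum ≤ 0
        rw [if_neg hcle, pvEnd_open _ _ hcle,
          pvFold_skip t (out ++ lines.take m) (pvDelta lines[m]) (by omega),
          pvSkipA_eq_drop t (pvDelta lines[m]) (by omega)]
        cases hj : (pvPrefixSums (pvDelta lines[m]) (t.map pvDelta)).findIdx?
            (fun s => decide (s ≤ 0)) with
        | some j =>
          have hdropj : lines.drop (m + (j + 1) + 1) = t.drop (j + 1) := by
            rw [ht, List.drop_drop]; congr 1; omega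
          rw [hdropj, ih (t.drop (j + 1))
            (le_trans (by simp only [List.length_drop]; omega) hlt)
            (out ++ lines.take m) 0, List.append_assoc]
        | none =>
          have hdropall : lines.drop (m + t.length + 1) = ([] : List String) := by
            rw [List.drop_eq_nil_iff]
            simp only [ht, List.length_drop]
            omega
          rw [hdropall, ih [] (by simp) (out ++ lines.take m) 0, List.append_assoc]

-- ===== VERDICT (by name: the statement is the Claim_ definition above) =====
theorem strip_preview_blocks_py_spec : Claim_equal_strip_preview_blocks_py := by
  intro s _
  unfold Spec_strip_preview_blocks_py
  simp only [strip_preview_blocks_py, strip_preview_blocks_py_alt,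
    pvFold_main (PySem.Str.splitlines s).length _ le_rfl, List.nil_append]
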